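-- pv_equiv track=rewrite | github.com/MohammedPathariya/Data-Structures | test.py | solution
-- ===== SOURCE A (Python) =====
-- from typing import List
--
-- def solution(tide_levels: List[int]) -> int:
--     """
--     Counts how many tide readings do not have any future readings with a higher tide.
--
--     This function iterates through the tide levels from right to left, maintaining
--     the maximum tide level encountered so far. A reading is counted if it is
--     greater than or equal to the maximum of all readings that come after it.
--
--     Args:
--         tide_levels: A list of integers representing tide levels at regular intervals.
--                      Constraints: 1 <= len(tide_levels) <= 5*10^3,
--                                   0 <= tide_levels[i] <= 10^6.
--
--     Returns:
--         An integer representing the number of such moments.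
--
--     Examples:
--         >>> solution([130, 140, 120, 150, 110, 160])
--         1
--         >>> solution([100, 160, 150, 130, 140])
--         3
--         >>> solution([50, 40, 30, 20, 10])
--         5
--     """
--     if not tide_levels:
--         return 0
--
--     # The last element is always a dominant reading.
--     # We can initialize our count to 1 and the max to the last element.
--     count = 1
--     max_tide_from_right = tide_levels[-1]
--
--     # Iterate backwards from the second-to-last element to the first.
--     for i in range(len(tide_levels) - 2, -1, -1):
--         current_tide = tide_levels[i]
--
--         # If the current tide is at least as high as the highest tide
--         # seen to its right, it's a "dominant" reading.
--         if current_tide >= max_tide_from_right: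
--             count += 1
--
--         # Update the max tide seen so far from the right.
--         max_tide_from_right = max(max_tide_from_right, current_tide)
--
--     return count
-- ===== SOURCE B (Python) =====
-- from typing import List
--
-- def solution(tide_levels: List[int]) -> int:
--     # Materialise the suffix-maximum table (built over the reversed list),
--     # then count positions where the reading equals the suffix maximum.
--     suffix_max = []
--     m = None
--     for x in reversed(tide_levels):
--         m = x if m is None or x > m else m
--         suffix_max.append(m)
--     suffix_max.reverse()
--     return sum(1 for x, s in zip(tide_levels, suffix_max) if x == s)
-- ===== Notes on version B (the rewrite author's own statement) =====
-- stated objective: alternative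
-- what changed: Replaces A's single backward index loop with a scalar running max by a materialised suffix-maximum table (built over the reversed list) consumed by a second zip-and-count pass.
import Mathlib
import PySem

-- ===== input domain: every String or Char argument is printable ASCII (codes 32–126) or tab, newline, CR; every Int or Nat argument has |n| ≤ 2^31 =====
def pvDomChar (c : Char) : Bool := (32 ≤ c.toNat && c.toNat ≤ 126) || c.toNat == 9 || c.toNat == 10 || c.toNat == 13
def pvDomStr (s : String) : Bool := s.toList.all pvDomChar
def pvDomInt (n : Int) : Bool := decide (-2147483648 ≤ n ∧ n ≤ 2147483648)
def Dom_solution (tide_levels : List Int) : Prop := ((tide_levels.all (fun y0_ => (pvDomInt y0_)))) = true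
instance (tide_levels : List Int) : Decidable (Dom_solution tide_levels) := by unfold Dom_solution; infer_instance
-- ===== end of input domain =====

-- B replaces A's single backward index loop (scalar running max) by a materialised
-- suffix-maximum table consumed by a second zip-and-count pass (alternative decomposition).


-- ===== PORT A =====
-- literal port of A: early return on [], then a backward index loop with state (count, max_tide_from_right)
def solution (tide_levels : List Int) : Int :=
  if tide_levels = [] then 0
  else
    let st := (PySem.List.pyRange ((tide_levels.length : Int) - 2) (-1) (-1)).foldl
      (fun (acc : Int × Int) i =>
        let current_tide := PySem.List.pyGetD tide_levels i 0
        ((if current_tide ≥ acc.2 then acc.1 + 1 else acc.1), max acc.2 current_tide))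
      (1, PySem.List.pyGetD tide_levels (-1) 0)
    st.1

-- ===== PORT B =====
-- literal port of B: build the suffix-max table over the reversed list, reverse it, count matches
def solution_alt (tide_levels : List Int) : Int :=
  let st := tide_levels.reverse.foldl
    (fun (acc : List Int × Option Int) x =>
      let m : Int := match acc.2 with
        | none => x
        | some mm => if x > mm then x else mm
      (acc.1 ++ [m], some m))
    ([], none)
  let suffix_max := st.1.reverse
  (((tide_levels.zip suffix_max).countP (fun p => p.1 == p.2) : Nat) : Int)

-- ===== PRECONDITION & SPEC =====
def Spec_solution (tide_levels : List Int) (out : Int) : Prop := out = solution_alt tide_levels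
instance (tide_levels : List Int) (out : Int) : Decidable (Spec_solution tide_levels out) := by unfold Spec_solution; infer_instance

-- ===== CLAIM (what is proved, stated in full; the proofs are below) =====
def Claim_equal_solution : Prop := ∀ (tide_levels : List Int), Dom_solution tide_levels → Spec_solution tide_levels (solution tide_levels)

-- ===== LEMMAS AND PROOFS =====

-- suffix maxima of a list: sufList xs [i] = max of xs[i:]
def sufList : List Int → List Int
  | [] => []
  | x :: rest => match sufList rest with
    | [] => [x]
    | m :: t => (if x > m then x else m) :: m :: t

-- B's folded state, characterised by sufList
theorem b_fold_eq (xs : List Int) :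
    xs.reverse.foldl
      (fun (acc : List Int × Option Int) x =>
        let m : Int := match acc.2 with
          | none => x
          | some mm => if x > mm then x else mm
        (acc.1 ++ [m], some m)) ([], none)
    = ((sufList xs).reverse, (sufList xs).head?) := by
  rw [List.foldl_reverse]
  induction xs with
  | nil => simp [sufList]
  | cons x rest ih =>
    simp only [List.foldr_cons, ih, sufList]
    cases hsr : sufList rest with
    | nil => simp
    | cons m t => simp

theorem solution_alt_eq (xs : List Int) :
    solution_alt xs = (((xs.zip (sufList xs)).countP (fun p => p.1 == p.2) : Nat) : Int) := by
  simp only [solution_alt, b_fold_eq, List.reverse_reverse]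

-- A's range-index loop is a foldr over the values of xs.dropLast
theorem map_get_range (xs : List Int) :
    (PySem.List.pyRange 0 ((xs.length : Int) - 1) 1).map (fun i => PySem.List.pyGetD xs i 0)
      = xs.dropLast := by
  have hlen : ((xs.dropLast.length : Int)) = (xs.length : Int) - 1 ∨ xs = [] := by
    cases xs with
    | nil => right; rfl
    | cons a l => left; simp
  rcases hlen with hlen | rfl
  · have : (PySem.List.pyRange 0 ((xs.length : Int) - 1) 1).map (fun i => PySem.List.pyGetD xs i 0)
        = (PySem.List.pyRange 0 ((xs.length : Int) - 1) 1).map (fun i => PySem.List.pyGetD xs.dropLast i 0) := by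
      apply List.map_congr_left
      intro i hi
      rw [PySem.List.mem_pyRange_one] at hi
      rw [PySem.List.pyGetD_eq_getElem xs 0 hi.1 (by omega),
          PySem.List.pyGetD_eq_getElem xs.dropLast 0 hi.1 (by omega)]
      exact (List.getElem_dropLast _).symm
    rw [this]
    have := PySem.List.map_pyGetD_pyRange_zero xs.dropLast 0
    rw [show ((xs.length : Int) - 1) = PySem.List.len xs.dropLast by rw [PySem.List.len_eq]; omega]
    exact this
  · simp [PySem.List.pyRange_one_eq_nil]

-- the heart: foldr of A's step over dropLast = (count of suffix-max matches, overall max)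
theorem main_fold (x : Int) (xs : List Int) :
    (x :: xs).dropLast.foldr
      (fun v (acc : Int × Int) => ((if v ≥ acc.2 then acc.1 + 1 else acc.1), max acc.2 v))
      (1, (x :: xs).getLast (by simp))
    = (((((x :: xs).zip (sufList (x :: xs))).countP (fun p => p.1 == p.2) : Nat) : Int),
       ((sufList (x :: xs)).headD 0)) := by
  induction xs generalizing x with
  | nil => simp [sufList]
  | cons y rest ih =>
    have hd : (x :: y :: rest).dropLast = x :: (y :: rest).dropLast := by simp
    have hl : (x :: y :: rest).getLast (by simp) = (y :: rest).getLast (by simp) := by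
      simp [List.getLast_cons]
    rw [hd, List.foldr_cons, hl, ih y]
    cases hsr : sufList (y :: rest) with
    | nil =>
      exfalso
      cases hr : sufList rest <;> simp [sufList, hr] at hsr
    | cons m t =>
      have hx : sufList (x :: y :: rest) = (if x > m then x else m) :: m :: t := by
        have : sufList (x :: y :: rest)
            = match sufList (y :: rest) with
              | [] => [x]
              | m :: t => (if x > m then x else m) :: m :: t := rfl
        rw [this, hsr]
      rw [hx]
      dsimp only
      simp only [List.zip_cons_cons, List.countP_cons, List.headD_cons, Prod.mk.injEq]
      by_cases hxm : x > m
      · have hge : x ≥ m := le_of_lt hxm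
        simp only [if_pos hxm, if_pos hge, beq_self_eq_true, if_pos, max_eq_right hge]
        constructor
        · push_cast; ring
        · trivial
      · have hle : x ≤ m := le_of_not_gt hxm
        simp only [if_neg hxm, max_eq_left hle, and_true]
        by_cases hxe : x = m
        · have hge : x ≥ m := hxe.ge
          simp [hxe]
        · have hge : ¬ x ≥ m := by omega
          have hbe : (x == m) = false := by simp [hxe]
          simp only [if_neg hge, hbe]
          push_cast; ring

theorem solution_eq (xs : List Int) (h : xs ≠ []) :
    solution xs = (((xs.zip (sufList xs)).countP (fun p => p.1 == p.2) : Nat) : Int) := by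
  simp only [solution, if_neg h]
  rw [PySem.List.pyRange_neg_one_eq_reverse,
      show ((xs.length : Int) - 2 + 1) = (xs.length : Int) - 1 by ring,
      show ((-1 : Int) + 1) = 0 by ring,
      List.foldl_reverse]
  simp only [PySem.List.pyGetD_neg_one xs 0 h]
  rw [show (List.foldr
        (fun i (acc : Int × Int) =>
          ((if PySem.List.pyGetD xs i 0 ≥ acc.2 then acc.1 + 1 else acc.1),
            max acc.2 (PySem.List.pyGetD xs i 0)))
        (1, xs.getLast h) (PySem.List.pyRange 0 ((xs.length : Int) - 1) 1))
      = List.foldr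
        (fun v (acc : Int × Int) => ((if v ≥ acc.2 then acc.1 + 1 else acc.1), max acc.2 v))
        (1, xs.getLast h)
        ((PySem.List.pyRange 0 ((xs.length : Int) - 1) 1).map (fun i => PySem.List.pyGetD xs i 0))
      from (List.foldr_map
        (f := fun i => PySem.List.pyGetD xs i 0)
        (g := fun v (acc : Int × Int) => ((if v ≥ acc.2 then acc.1 + 1 else acc.1), max acc.2 v))
        (l := PySem.List.pyRange 0 ((xs.length : Int) - 1) 1)
        (init := (1, xs.getLast h))).symm]
  rw [map_get_range xs]
  obtain ⟨x, rest, rfl⟩ := List.exists_cons_of_ne_nil h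
  rw [show (x :: rest).getLast h = (x :: rest).getLast (by simp) from rfl, main_fold x rest]

-- ===== VERDICT (by name: the statement is the Claim_ definition above) =====
theorem solution_spec : Claim_equal_solution := by
  intro xs _
  unfold Spec_solution
  by_cases h : xs = []
  · subst h; rfl
  · rw [solution_eq xs h, solution_alt_eq]
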